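-- pv_equiv track=rewrite | github.com/chpollin/FemPrompt_SozArb | analysis/generate_obsidian_vault.py | create_papers_index
-- ===== SOURCE A (Python) =====
-- from typing import Dict, List, Set, Tuple, Optional
-- from collections import defaultdict
--
-- def create_papers_index(papers: List[Dict]) -> str:
--     """Create papers index"""
--     note = "---\n"
--     note += "title: Papers Index\n"
--     note += "type: moc\n"
--     note += "tags: [moc, papers-index]\n"
--     note += "---\n\n"
--
--     note += "# All Research Papers\n\n"
--
--     # Group by year
--     papers_by_year = defaultdict(list)
--     for paper in papers:
--         year = paper.get('year', 'Unknown')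
--         papers_by_year[year].append(paper)
--
--     for year in sorted(papers_by_year.keys(), reverse=True):
--         note += f"## {year}\n\n"
--         for paper in papers_by_year[year]:
--             note += f"- [[{paper['title']}]]\n"
--         note += "\n"
--
--     return note
-- ===== SOURCE B (Python) =====
-- def create_papers_index(papers):
--     """Create papers index"""
--     header = (
--         "---\n"
--         "title: Papers Index\n"
--         "type: moc\n"
--         "tags: [moc, papers-index]\n"
--         "---\n\n"
--         "# All Research Papers\n\n"
--     )
--     years = sorted({p.get('year', 'Unknown') for p in papers}, reverse=True)
--     sections = [
--         "## %s\n\n%s\n" % (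
--             y,
--             "".join("- [[%s]]\n" % p['title']
--                     for p in papers
--                     if p.get('year', 'Unknown') == y),
--         )
--         for y in years
--     ]
--     return header + "".join(sections)
-- ===== Notes on version B (the rewrite author's own statement) =====
-- stated objective: alternative
-- what changed: Replaces A's defaultdict grouping pass plus per-group lookup by computing the sorted distinct years from a set and emitting each section with a per-year filter over the paper list, joined into the result.
import Mathlib
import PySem

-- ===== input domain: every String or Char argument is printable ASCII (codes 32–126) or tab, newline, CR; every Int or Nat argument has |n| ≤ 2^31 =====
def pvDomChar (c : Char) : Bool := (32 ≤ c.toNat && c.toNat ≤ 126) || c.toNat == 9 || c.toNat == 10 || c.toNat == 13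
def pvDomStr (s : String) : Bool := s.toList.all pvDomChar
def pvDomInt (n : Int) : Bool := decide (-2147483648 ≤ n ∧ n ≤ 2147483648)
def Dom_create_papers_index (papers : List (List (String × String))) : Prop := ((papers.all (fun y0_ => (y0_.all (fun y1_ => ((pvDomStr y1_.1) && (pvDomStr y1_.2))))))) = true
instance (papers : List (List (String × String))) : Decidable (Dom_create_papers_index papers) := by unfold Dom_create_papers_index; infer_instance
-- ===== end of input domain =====

-- B replaces A's defaultdict grouping pass by sorted distinct years + a per-year filter scan (alternative decomposition, same output).


-- ===== PORT A =====
-- paper.get('year', 'Unknown')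
def pvYear (p : List (String × String)) : String :=
  (PySem.Dict.mk p).getD "year" "Unknown"

-- paper['title'] raises KeyError when absent (excluded by Pre_); total form uses getD ""
def pvTitle (p : List (String × String)) : String :=
  ((PySem.Dict.mk p).get? "title").getD ""

def create_papers_index (papers : List (List (String × String))) : String :=
  let note := "---\n"
  let note := note ++ "title: Papers Index\n"
  let note := note ++ "type: moc\n"
  let note := note ++ "tags: [moc, papers-index]\n"
  let note := note ++ "---\n\n"
  let note := note ++ "# All Research Papers\n\n"
  -- papers_by_year = defaultdict(list); papers_by_year[year].append(paper)
  let papersByYear : PySem.Dict String (List (List (String × String))) :=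
    papers.foldl (fun d p => d.modify (pvYear p) [] (fun l => l ++ [p])) PySem.Dict.empty
  -- for year in sorted(papers_by_year.keys(), reverse=True): …
  (PySem.List.sorted papersByYear.keys (fun y => y) true).foldl
    (fun note year =>
      let note := note ++ ("## " ++ year ++ "\n\n")
      let note := (papersByYear.getD year []).foldl
        (fun note p => note ++ ("- [[" ++ pvTitle p ++ "]]\n")) note
      note ++ "\n")
    note

-- ===== PORT B =====
def create_papers_index_alt (papers : List (List (String × String))) : String :=
  let header := "---\ntitle: Papers Index\ntype: moc\ntags: [moc, papers-index]\n---\n\n# All Research Papers\n\n"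
  -- years = sorted({p.get('year','Unknown') for p in papers}, reverse=True)
  let years := PySem.List.sorted (PySem.Set.ofList (papers.map pvYear)) (fun y => y) true
  let sections := years.map (fun y =>
    "## " ++ y ++ "\n\n" ++
    PySem.Str.join "" ((papers.filter (fun p => pvYear p == y)).map
      (fun p => "- [[" ++ pvTitle p ++ "]]\n")) ++ "\n")
  header ++ PySem.Str.join "" sections

-- ===== PRECONDITION & SPEC =====
-- Pre_ excludes exactly the papers missing the 'title' key, on which Python A raises KeyError.
def Pre_create_papers_index (papers : List (List (String × String))) : Prop :=
  (papers.all (fun p => (PySem.Dict.mk p).contains "title")) = true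
instance (papers : List (List (String × String))) : Decidable (Pre_create_papers_index papers) := by
  unfold Pre_create_papers_index; infer_instance

def pvWitness_create_papers_index : (List (List (String × String))) :=
  [[("title", "Deep Learning"), ("year", "2020")], [("title", "Old Paper")]]

def Spec_create_papers_index (papers : List (List (String × String))) (out : String) : Prop := out = create_papers_index_alt papers
instance (papers : List (List (String × String))) (out : String) : Decidable (Spec_create_papers_index papers out) := by unfold Spec_create_papers_index; infer_instance

-- ===== CLAIM (what is proved, stated in full; the proofs are below) =====
def Claim_equal_create_papers_index : Prop := ∀ (papers : List (List (String × String))), Dom_create_papers_index papers → Pre_create_papers_index papers → Spec_create_papers_index papers (create_papers_index papers)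

-- ===== LEMMAS AND PROOFS =====

-- "".join(s :: rest) = s ++ "".join(rest)
theorem join_empty_cons (s : String) (rest : List String) :
    PySem.Str.join "" (s :: rest) = s ++ PySem.Str.join "" rest := by
  cases rest with
  | nil => simp [PySem.Str.join, PySem.Chars.join, List.intercalate]
  | cons t ts =>
      simp [PySem.Str.join, PySem.Chars.join, List.intercalate, String.ofList_append]

theorem join_empty_nil : PySem.Str.join "" ([] : List String) = "" := rfl

-- a left fold appending f x for each x equals the accumulator followed by "".join of the pieces
theorem foldl_append_join {α : Type} (f : α → String) (xs : List α) (a : String) :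
    xs.foldl (fun n x => n ++ f x) a = a ++ PySem.Str.join "" (xs.map f) := by
  induction xs generalizing a with
  | nil => simp [join_empty_nil]
  | cons x t ih =>
      simp only [List.foldl_cons, List.map_cons, join_empty_cons, ih, String.append_assoc]

-- the defaultdict group of a year is the filter of papers with that year
theorem groups_eq_filter (papers : List (List (String × String))) (y : String) :
    (papers.foldl (fun d p => d.modify (pvYear p) [] (fun l => l ++ [p]))
        (PySem.Dict.empty : PySem.Dict String (List (List (String × String))))).getD y []
      = papers.filter (fun p => pvYear p == y) := by
  have h := PySem.Dict.getD_foldl_modify_append (papers.map (fun p => (pvYear p, p)))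
      (PySem.Dict.empty : PySem.Dict String (List (List (String × String)))) y
  simpa [List.foldl_map, List.filter_map, Function.comp_def] using h

-- the defaultdict's keys are the distinct years in first-occurrence order
theorem keys_eq_set (papers : List (List (String × String))) :
    (papers.foldl (fun d p => d.modify (pvYear p) [] (fun l => l ++ [p]))
        (PySem.Dict.empty : PySem.Dict String (List (List (String × String))))).keys
      = PySem.Set.ofList (papers.map pvYear) := by
  rw [PySem.Dict.keys_foldl_modify_key papers pvYear [] (fun _ p l => l ++ [p]) PySem.Dict.empty]
  rw [show (PySem.Dict.empty : PySem.Dict String (List (List (String × String)))).keys = [] from rfl,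
      ← PySem.Set.update_nil_left]

-- ===== VERDICT (by name: the statement is the Claim_ definition above) =====
theorem create_papers_index_spec : Claim_equal_create_papers_index := by
  intro papers _ _
  unfold Spec_create_papers_index create_papers_index create_papers_index_alt
  simp only [keys_eq_set, groups_eq_filter]
  rw [PySem.List.foldl_congr_mem _ _
        (fun (note : String) (y : String) =>
          note ++ ("## " ++ y ++ "\n\n" ++
            PySem.Str.join "" ((papers.filter (fun p => pvYear p == y)).map
              (fun p => "- [[" ++ pvTitle p ++ "]]\n")) ++ "\n")) _
        (by
          intro note y _
          rw [foldl_append_join]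
          simp only [String.append_assoc]),
      foldl_append_join]
  congr 1
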